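-- pv_equiv track=rewrite | github.com/lgeoffroy/aoc | 2021/day10.py | get_closing_sequence_score
-- ===== SOURCE A (Python) =====
-- from functools import reduce
--
-- def get_score(x):
--     return {
--         "]": 57,
--         "[": 2,
--         "}": 1197,
--         "{": 3,
--         ")": 3,
--         "(": 1,
--         ">": 25137,
--         "<": 4,
--     }[x] if x else 0
--
-- def get_closing_sequence_score(line):
--     stack = []
--     for x in line:
--         if x in "[{(<":
--             stack.append(x)
--         else:
--             stack.pop()
--     return reduce(lambda acc, x: acc*5 + get_score(x), reversed(stack), 0)
-- ===== SOURCE B (Python) =====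
-- def get_score(x):
--     return {
--         "]": 57,
--         "[": 2,
--         "}": 1197,
--         "{": 3,
--         ")": 3,
--         "(": 1,
--         ">": 25137,
--         "<": 4,
--     }[x] if x else 0
--
-- def get_closing_sequence_score(line):
--     # The autocomplete score is a base-5 numeral whose digits are the opener
--     # scores (all in 1..4), bottom of the stack least significant.  So keep no
--     # stack at all: the running total IS the encoded stack.  Push = add a digit
--     # at the current place, pop = drop the most significant digit.
--     total = 0
--     place = 1
--     for x in line:
--         if x in "[{(<":
--             total += get_score(x) * place
--             place *= 5
--         else:
--             place //= 5
--             total %= place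
--     return total
-- ===== Notes on version B (the rewrite author's own statement) =====
-- stated objective: alternative
-- what changed: The stack simulation plus reduce-over-reversed-stack Horner fold is replaced by a base-5 arithmetic encoding: since every opener score is 1..4 (a nonzero base-5 digit), the running total IS the stack, push adds a digit at the current place (total += get_score(x)*place; place *= 5) and pop drops the most significant digit (place //= 5; total %= place), so there is no stack and no final pass; the functools import disappears.
import Mathlib
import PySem

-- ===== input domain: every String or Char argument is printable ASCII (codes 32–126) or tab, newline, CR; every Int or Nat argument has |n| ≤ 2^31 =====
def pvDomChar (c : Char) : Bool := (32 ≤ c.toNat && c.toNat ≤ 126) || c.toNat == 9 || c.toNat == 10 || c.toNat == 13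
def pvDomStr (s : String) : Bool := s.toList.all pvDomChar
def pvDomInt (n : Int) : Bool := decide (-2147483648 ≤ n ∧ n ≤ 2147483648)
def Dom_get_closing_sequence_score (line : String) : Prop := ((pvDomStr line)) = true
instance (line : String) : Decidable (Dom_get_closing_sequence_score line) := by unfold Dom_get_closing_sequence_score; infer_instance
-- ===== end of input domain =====

-- ===== PORT A =====
-- B replaces A's stack simulation + Horner fold over the reversed stack by a base-5
-- arithmetic encoding of the stack (opener scores are 1..4, i.e. nonzero base-5
-- digits), with no stack and no final pass (objective: alternative).
-- pvGetScore: the dict lookup in A's get_score, transliterated branch by branch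
-- (the scan only pushes characters of "[{(<", so only those keys are ever looked up;
-- on any other key Python would raise KeyError — that branch is unreachable, ported as 0).
def pvGetScore (x : Char) : Int :=
  if x = ']' then 57 else if x = '[' then 2 else if x = '}' then 1197
  else if x = '{' then 3 else if x = ')' then 3 else if x = '(' then 1
  else if x = '>' then 25137 else if x = '<' then 4 else 0

-- one step of A's scan: push openers, otherwise stack.pop() (none = IndexError)
def pvStepA (st : Option (List Char)) (x : Char) : Option (List Char) :=
  st.bind fun s =>
    if x ∈ "[{(<".toList then some (s ++ [x])
    else (PySem.List.pop? s).map (fun r => r.2)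

def get_closing_sequence_score (line : String) : Int :=
  match line.toList.foldl pvStepA (some []) with
  | some stack => stack.reverse.foldl (fun acc x => acc * 5 + pvGetScore x) 0
  | none => 0   -- unreachable under Pre_ (Python raises IndexError here)

-- ===== PORT B =====
-- Source B's get_score: the dict lookup (only applied to openers; the KeyError branch and
-- the falsy-x branch are unreachable there, ported as the .getD 0 default).
def pvScoreDictB : PySem.Dict Char Int :=
  PySem.Dict.ofList
    [(']', 57), ('[', 2), ('}', 1197), ('{', 3), (')', 3), ('(', 1), ('>', 25137), ('<', 4)]

def pvScoreB (x : Char) : Int := (pvScoreDictB.get? x).getD 0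

-- one step of Source B's loop over (total, place):
--   opener: total += get_score(x) * place; place *= 5
--   else:   place //= 5; total %= place  (Python's % raises ZeroDivisionError when
--           the new place is 0 — an underflow of the encoded stack → none)
def pvStepB (tp : Option (Int × Int)) (x : Char) : Option (Int × Int) :=
  tp.bind fun s =>
    if x ∈ "[{(<".toList then
      some (s.1 + pvScoreB x * s.2, s.2 * 5)
    else
      (PySem.Int.mod? s.1 (PySem.Int.floordiv s.2 5)).map
        (fun m => (m, PySem.Int.floordiv s.2 5))

def get_closing_sequence_score_alt (line : String) : Int :=
  match line.toList.foldl pvStepB (some ((0 : Int), (1 : Int))) with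
  | some tp => tp.1
  | none => 0   -- unreachable under Pre_ (Python raises ZeroDivisionError here)

-- ===== PRECONDITION & SPEC =====
-- Pre_ excludes exactly the unbalanced lines on which A's list.pop() raises
-- IndexError (and B's `total %= place` raises ZeroDivisionError): every non-opener
-- character must see a nonempty stack, i.e. strictly more openers than non-openers
-- before it.
def Pre_get_closing_sequence_score (line : String) : Prop :=
  ∀ i : Nat, i < line.toList.length →
    line.toList[i]! ∈ "[{(<".toList ∨
      i < 2 * (line.toList.take i).countP (fun c => decide (c ∈ "[{(<".toList))
instance (line : String) : Decidable (Pre_get_closing_sequence_score line) := by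
  unfold Pre_get_closing_sequence_score; infer_instance
def pvWitness_get_closing_sequence_score : String := "()[{(<"

def Spec_get_closing_sequence_score (line : String) (out : Int) : Prop := out = get_closing_sequence_score_alt line
instance (line : String) (out : Int) : Decidable (Spec_get_closing_sequence_score line out) := by unfold Spec_get_closing_sequence_score; infer_instance

-- ===== CLAIM (what is proved, stated in full; the proofs are below) =====
def Claim_equal_get_closing_sequence_score : Prop := ∀ (line : String), Dom_get_closing_sequence_score line → Pre_get_closing_sequence_score line → Spec_get_closing_sequence_score line (get_closing_sequence_score line)

-- ===== LEMMAS AND PROOFS =====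

-- the two score functions agree on every character (same 8 keys, default 0 elsewhere)
theorem pvScoreEq (x : Char) : pvScoreB x = pvGetScore x := by
  have hmk : pvScoreDictB = PySem.Dict.mk
      [(']', 57), ('[', 2), ('}', 1197), ('{', 3), (')', 3), ('(', 1), ('>', 25137), ('<', 4)] := by
    decide
  by_cases h1 : x = ']'; · subst h1; decide
  by_cases h2 : x = '['; · subst h2; decide
  by_cases h3 : x = '}'; · subst h3; decide
  by_cases h4 : x = '{'; · subst h4; decide
  by_cases h5 : x = ')'; · subst h5; decide
  by_cases h6 : x = '('; · subst h6; decide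
  by_cases h7 : x = '>'; · subst h7; decide
  by_cases h8 : x = '<'; · subst h8; decide
  unfold pvScoreB pvGetScore
  rw [hmk]
  simp only [PySem.Dict.get?_mk_cons, beq_iff_eq]
  rw [if_neg (fun e => h1 e.symm), if_neg (fun e => h2 e.symm),
      if_neg (fun e => h3 e.symm), if_neg (fun e => h4 e.symm),
      if_neg (fun e => h5 e.symm), if_neg (fun e => h6 e.symm),
      if_neg (fun e => h7 e.symm), if_neg (fun e => h8 e.symm),
      if_neg h1, if_neg h2, if_neg h3, if_neg h4, if_neg h5, if_neg h6, if_neg h7, if_neg h8]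
  simp [PySem.Dict.get?]

-- the base-5 value of a stack, bottom digit least significant: the number both
-- programs ultimately produce
def pvEnc : List Char → Int
  | [] => 0
  | c :: t => pvGetScore c + 5 * pvEnc t

theorem pvEnc_append (s : List Char) (y : Char) :
    pvEnc (s ++ [y]) = pvEnc s + pvGetScore y * 5 ^ s.length := by
  induction s with
  | nil => simp [pvEnc]
  | cons c t ih =>
      simp only [List.cons_append, pvEnc, ih, List.length_cons, pow_succ]
      ring

theorem pvScore_open (c : Char) (h : c ∈ "[{(<".toList) :
    1 ≤ pvGetScore c ∧ pvGetScore c ≤ 4 := by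
  have h' : c = '[' ∨ c = '{' ∨ c = '(' ∨ c = '<' := by simpa using h
  rcases h' with rfl | rfl | rfl | rfl <;> exact ⟨by decide, by decide⟩

theorem pvEnc_bounds (s : List Char) (h : ∀ c ∈ s, c ∈ "[{(<".toList) :
    0 ≤ pvEnc s ∧ pvEnc s < 5 ^ s.length := by
  induction s with
  | nil => simp [pvEnc]
  | cons c t ih =>
      obtain ⟨h1, h2⟩ := ih (fun d hd => h d (List.mem_cons_of_mem c hd))
      obtain ⟨h3, h4⟩ := pvScore_open c (h c List.mem_cons_self)
      simp only [pvEnc, List.length_cons, pow_succ]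
      have hK : (0 : Int) < 5 ^ t.length := by positivity
      constructor <;> nlinarith

-- a failed state stays failed in both scans
theorem pvFoldA_none (l : List Char) : l.foldl pvStepA none = none := by
  induction l with
  | nil => rfl
  | cons x t ih => simpa [pvStepA] using ih

theorem pvFoldB_none (l : List Char) : l.foldl pvStepB none = none := by
  induction l with
  | nil => rfl
  | cons x t ih => simpa [pvStepB] using ih

-- the heart of the equivalence: B's (total, place) state is exactly the base-5
-- encoding of A's stack together with its place value, failure included
theorem pvFoldInv (l : List Char) : ∀ (st : List Char),
    (∀ c ∈ st, c ∈ "[{(<".toList) →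
    l.foldl pvStepB (some (pvEnc st, 5 ^ st.length))
      = Option.map (fun s => (pvEnc s, (5 : Int) ^ s.length)) (l.foldl pvStepA (some st)) := by
  induction l with
  | nil => intro st _; rfl
  | cons x t ih =>
      intro st h
      rw [List.foldl_cons, List.foldl_cons]
      by_cases hx : x ∈ "[{(<".toList
      · have ha : pvStepA (some st) x = some (st ++ [x]) := by
          simp only [pvStepA, Option.bind_some]; rw [if_pos hx]
        have hb : pvStepB (some (pvEnc st, 5 ^ st.length)) x
            = some (pvEnc (st ++ [x]), 5 ^ (st ++ [x]).length) := by
          simp only [pvStepB, Option.bind_some]; rw [if_pos hx]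
          rw [pvScoreEq, pvEnc_append]
          simp [List.length_append, pow_succ]
        rw [ha, hb]
        exact ih (st ++ [x]) (fun c hc => by
          rcases List.mem_append.mp hc with hc | hc
          · exact h c hc
          · rw [List.mem_singleton] at hc; exact hc ▸ hx)
      · rcases List.eq_nil_or_concat st with rfl | ⟨st', y, rfl⟩
        · -- empty stack: A pops from [] (none); B divides place 1 down to 0 and
          -- the modulo becomes none
          have ha : pvStepA (some []) x = none := by
            simp only [pvStepA, Option.bind_some]; rw [if_neg hx]
            simp [PySem.List.pop?]
          have hb : pvStepB (some (pvEnc [], 5 ^ ([] : List Char).length)) x = none := by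
            simp only [pvStepB, Option.bind_some]; rw [if_neg hx]
            decide
          rw [ha, hb, pvFoldA_none, pvFoldB_none]
          rfl
        · simp only [List.concat_eq_append] at *
          have hall' : ∀ c ∈ st', c ∈ "[{(<".toList := fun c hc => h c (by simp [hc])
          have ha : pvStepA (some (st' ++ [y])) x = some st' := by
            simp only [pvStepA, Option.bind_some]; rw [if_neg hx, PySem.List.pop?_last]
            rfl
          have hp : PySem.Int.floordiv ((5 : Int) ^ (st' ++ [y]).length) 5
              = 5 ^ st'.length := by
            rw [PySem.Int.floordiv_eq_ediv_of_pos (by norm_num),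
              List.length_append, List.length_singleton, pow_succ]
            exact Int.mul_ediv_cancel _ (by norm_num)
          have hb : pvStepB (some (pvEnc (st' ++ [y]), 5 ^ (st' ++ [y]).length)) x
              = some (pvEnc st', 5 ^ st'.length) := by
            simp only [pvStepB, Option.bind_some]; rw [if_neg hx, hp]
            have h5 : ((5 : Int) ^ st'.length) ≠ 0 := by positivity
            have hmod : PySem.Int.mod? (pvEnc (st' ++ [y])) ((5 : Int) ^ st'.length)
                = some (pvEnc st') := by
              obtain ⟨hb1, hb2⟩ := pvEnc_bounds st' hall'
              rw [show PySem.Int.mod? (pvEnc (st' ++ [y])) ((5 : Int) ^ st'.length)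
                  = some (PySem.Int.mod (pvEnc (st' ++ [y])) ((5 : Int) ^ st'.length)) by
                simp [PySem.Int.mod?, PySem.Int.mod, h5]]
              rw [PySem.Int.mod_eq_emod_of_pos (by positivity), pvEnc_append]
              rw [show (pvEnc st' + pvGetScore y * 5 ^ st'.length) % 5 ^ st'.length
                  = pvEnc st' % 5 ^ st'.length by simp]
              rw [Int.emod_eq_of_lt hb1 hb2]
            rw [hmod]; rfl
          rw [ha, hb]
          exact ih st' hall'

-- A's final Horner fold over the reversed stack computes the same base-5 value
theorem pvHornerA (s : List Char) (acc : Int) :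
    s.reverse.foldl (fun a x => a * 5 + pvGetScore x) acc
      = acc * 5 ^ s.length + pvEnc s := by
  induction s generalizing acc with
  | nil => simp [pvEnc]
  | cons x t ih =>
      rw [List.reverse_cons, List.foldl_append]
      simp only [List.foldl_cons, List.foldl_nil, ih]
      simp only [pvEnc, List.length_cons, pow_succ]
      ring

-- ===== VERDICT (by name: the statement is the Claim_ definition above) =====
theorem get_closing_sequence_score_spec : Claim_equal_get_closing_sequence_score := by
  intro line _ _
  unfold Spec_get_closing_sequence_score get_closing_sequence_score get_closing_sequence_score_alt
  have hinv := pvFoldInv line.toList [] (by simp)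
  rw [show (some ((0 : Int), (1 : Int))) = some (pvEnc [], 5 ^ ([] : List Char).length) by rfl,
    hinv]
  cases h : line.toList.foldl pvStepA (some []) with
  | none => rfl
  | some stack =>
      simp only [Option.map_some]
      rw [pvHornerA stack 0]
      ring
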